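-- pv_equiv track=rewrite | github.com/JustinBenjamin1983/Alchemy | server/opinion/api-2/DDChat/__init__.py | consolidate_risks
-- ===== SOURCE A (Python) =====
-- def consolidate_risks(all_risks):
--     """Consolidate and rank risks from multiple sources"""
--     risk_map = {}
--
--     for risk in all_risks:
--         risk_key = risk.get("description", "Unknown risk")
--
--         if risk_key in risk_map:
--             # If risk already exists, take the higher severity
--             existing_level = risk_map[risk_key]["level"]
--             new_level = risk["level"]
--
--             severity_order = {"yellow": 1, "amber": 2, "red": 3}
--             if severity_order.get(new_level, 0) > severity_order.get(existing_level, 0):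
--                 risk_map[risk_key] = risk
--         else:
--             risk_map[risk_key] = risk
--
--     # Sort by severity (red first, then amber, then yellow)
--     severity_order = {"red": 3, "amber": 2, "yellow": 1}
--     sorted_risks = sorted(
--         risk_map.values(),
--         key=lambda x: severity_order.get(x["level"], 0),
--         reverse=True
--     )
--
--     return sorted_risks[:10]  # Limit to top 10 risks
-- ===== SOURCE B (Python) =====
-- def _sev(level):
--     return {"yellow": 1, "amber": 2, "red": 3}.get(level, 0)
--
--
-- def consolidate_risks(all_risks):
--     """Consolidate and rank risks: dedup by description keeping max severity,
--     then one bucket pass (red/amber/yellow/other) instead of a comparison sort."""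
--     risk_map = {}
--     for risk in all_risks:
--         key = risk.get("description", "Unknown risk")
--         cur = risk_map.get(key)
--         if cur is None or _sev(risk["level"]) > _sev(cur["level"]):
--             risk_map[key] = risk
--
--     red, amber, yellow, other = [], [], [], []
--     for risk in risk_map.values():
--         level = risk["level"]
--         if level == "red":
--             red.append(risk)
--         elif level == "amber":
--             amber.append(risk)
--         elif level == "yellow":
--             yellow.append(risk)
--         else:
--             other.append(risk)
--     return (red + amber + yellow + other)[:10]
-- ===== Notes on version B (the rewrite author's own statement) =====
-- stated objective: alternative
-- what changed: B keeps the dedup-by-description pass but replaces A's comparison sort (severity-dict key, reverse=True) by a single bucket pass appending each surviving risk to a red/amber/yellow/other bucket and concatenating, which reproduces the stable order without sorting.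
import Mathlib
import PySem

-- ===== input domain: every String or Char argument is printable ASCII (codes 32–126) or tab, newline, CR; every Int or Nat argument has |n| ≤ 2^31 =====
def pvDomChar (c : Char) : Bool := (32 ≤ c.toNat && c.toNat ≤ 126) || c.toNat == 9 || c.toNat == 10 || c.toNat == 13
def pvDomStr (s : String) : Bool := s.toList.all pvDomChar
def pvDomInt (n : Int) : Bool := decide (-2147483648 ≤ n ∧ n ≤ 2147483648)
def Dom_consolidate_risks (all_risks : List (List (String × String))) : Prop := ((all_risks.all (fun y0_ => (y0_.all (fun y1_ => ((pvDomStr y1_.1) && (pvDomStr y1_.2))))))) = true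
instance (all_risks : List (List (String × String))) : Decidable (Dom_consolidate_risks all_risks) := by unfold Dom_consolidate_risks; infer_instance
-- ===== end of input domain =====

-- B keeps A's dedup-by-description pass but replaces A's stable reverse sort of the surviving
-- risks by a single bucket pass (red/amber/yellow/other buckets, concatenated).

-- ===== PORT A =====
def consolidate_risks (all_risks : List (List (String × String))) : List (List (String × String)) :=
  let risk_map : PySem.Dict String (List (String × String)) :=
    all_risks.foldl (fun m risk =>
      let risk_key := PySem.Dict.getD (PySem.Dict.mk risk) "description" "Unknown risk"
      match m.get? risk_key with
      | some existing =>
          -- risk_map[risk_key]["level"] / risk["level"]: Python raises KeyError when "level"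
          -- is absent; Pre_ excludes that, so the default "" is never read inside Pre_
          let existing_level := PySem.Dict.getD (PySem.Dict.mk existing) "level" ""
          let new_level := PySem.Dict.getD (PySem.Dict.mk risk) "level" ""
          let so := PySem.Dict.mk [("yellow", (1 : Int)), ("amber", 2), ("red", 3)]
          if so.getD new_level 0 > so.getD existing_level 0 then m.insert risk_key risk else m
      | none => m.insert risk_key risk)
      PySem.Dict.empty
  let so2 := PySem.Dict.mk [("red", (3 : Int)), ("amber", 2), ("yellow", 1)]
  let sorted_risks := PySem.List.sorted risk_map.values
      (fun x => so2.getD (PySem.Dict.getD (PySem.Dict.mk x) "level" "") 0) true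
  PySem.List.slice sorted_risks none (some 10)

-- ===== PORT B =====
-- _sev(level) = {"yellow": 1, "amber": 2, "red": 3}.get(level, 0)
def pvSevB (level : String) : Int :=
  PySem.Dict.getD (PySem.Dict.mk [("yellow", (1 : Int)), ("amber", 2), ("red", 3)]) level 0

def consolidate_risks_alt (all_risks : List (List (String × String))) : List (List (String × String)) :=
  let risk_map : PySem.Dict String (List (String × String)) :=
    all_risks.foldl (fun m risk =>
      let key := PySem.Dict.getD (PySem.Dict.mk risk) "description" "Unknown risk"
      match m.get? key with
      | none => m.insert key risk            -- cur is None
      | some cur =>                          -- risk["level"] / cur["level"]: KeyError outside Pre_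
          if pvSevB (PySem.Dict.getD (PySem.Dict.mk risk) "level" "") >
             pvSevB (PySem.Dict.getD (PySem.Dict.mk cur) "level" "")
          then m.insert key risk else m)
      PySem.Dict.empty
  let b := risk_map.values.foldl
      (fun (b : List (List (String × String)) × List (List (String × String)) ×
              List (List (String × String)) × List (List (String × String))) risk =>
        let level := PySem.Dict.getD (PySem.Dict.mk risk) "level" ""
        if level == "red" then (b.1 ++ [risk], b.2.1, b.2.2.1, b.2.2.2)
        else if level == "amber" then (b.1, b.2.1 ++ [risk], b.2.2.1, b.2.2.2)
        else if level == "yellow" then (b.1, b.2.1, b.2.2.1 ++ [risk], b.2.2.2)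
        else (b.1, b.2.1, b.2.2.1, b.2.2.2 ++ [risk]))
      ([], [], [], [])
  PySem.List.slice (b.1 ++ b.2.1 ++ b.2.2.1 ++ b.2.2.2) none (some 10)

-- ===== PRECONDITION & SPEC =====
-- A raises KeyError on any input containing a risk without a "level" key (read in the duplicate
-- branch or by the sort key); exactly those inputs are excluded.
def Pre_consolidate_risks (all_risks : List (List (String × String))) : Prop :=
  ∀ risk ∈ all_risks, (PySem.Dict.mk risk).contains "level" = true
instance (all_risks : List (List (String × String))) : Decidable (Pre_consolidate_risks all_risks) := by
  unfold Pre_consolidate_risks; infer_instance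

def pvWitness_consolidate_risks : (List (List (String × String))) :=
  [[("description", "flood"), ("level", "amber")], [("description", "flood"), ("level", "red")]]

def Spec_consolidate_risks (all_risks : List (List (String × String))) (out : List (List (String × String))) : Prop := out = consolidate_risks_alt all_risks
instance (all_risks : List (List (String × String))) (out : List (List (String × String))) : Decidable (Spec_consolidate_risks all_risks out) := by unfold Spec_consolidate_risks; infer_instance

-- ===== CLAIM (what is proved, stated in full; the proofs are below) =====
def Claim_equal_consolidate_risks : Prop := ∀ (all_risks : List (List (String × String))), Dom_consolidate_risks all_risks → Pre_consolidate_risks all_risks → Spec_consolidate_risks all_risks (consolidate_risks all_risks)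

-- ===== LEMMAS AND PROOFS =====

-- the level of a risk, and its severity rank
def pvLvl (x : List (String × String)) : String := PySem.Dict.getD (PySem.Dict.mk x) "level" ""
def pvKey (x : List (String × String)) : Int := pvSevB (pvLvl x)

theorem pvSevB_other (l : String) (h1 : l ≠ "yellow") (h2 : l ≠ "amber") (h3 : l ≠ "red") :
    pvSevB l = 0 := by
  simp [pvSevB, PySem.Dict.getD, PySem.Dict.get?, Ne.symm h1, Ne.symm h2, Ne.symm h3]

theorem pvSevB_cases (l : String) : pvSevB l = 3 ∨ pvSevB l = 2 ∨ pvSevB l = 1 ∨ pvSevB l = 0 := by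
  by_cases h1 : l = "yellow"; · subst h1; decide
  by_cases h2 : l = "amber"; · subst h2; decide
  by_cases h3 : l = "red"; · subst h3; decide
  simp [pvSevB_other l h1 h2 h3]

theorem pvSevB_red (l : String) : (l == "red") = (pvSevB l == 3) := by
  by_cases h1 : l = "yellow"; · subst h1; decide
  by_cases h2 : l = "amber"; · subst h2; decide
  by_cases h3 : l = "red"; · subst h3; decide
  simp [pvSevB_other l h1 h2 h3, h3]

theorem pvSevB_amber (l : String) : (l == "amber") = (pvSevB l == 2) := by
  by_cases h1 : l = "yellow"; · subst h1; decide
  by_cases h2 : l = "amber"; · subst h2; decide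
  by_cases h3 : l = "red"; · subst h3; decide
  simp [pvSevB_other l h1 h2 h3, h2]

theorem pvSevB_yellow (l : String) : (l == "yellow") = (pvSevB l == 1) := by
  by_cases h1 : l = "yellow"; · subst h1; decide
  by_cases h2 : l = "amber"; · subst h2; decide
  by_cases h3 : l = "red"; · subst h3; decide
  simp [pvSevB_other l h1 h2 h3, h1]

-- A's sort-key dict agrees with _sev
theorem pvSevA_eq (l : String) :
    (PySem.Dict.mk [("red", (3 : Int)), ("amber", 2), ("yellow", 1)]).getD l 0 = pvSevB l := by
  by_cases h1 : l = "yellow"; · subst h1; decide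
  by_cases h2 : l = "amber"; · subst h2; decide
  by_cases h3 : l = "red"; · subst h3; decide
  simp [pvSevB_other l h1 h2 h3, PySem.Dict.getD, PySem.Dict.get?, Ne.symm h1, Ne.symm h2, Ne.symm h3]

-- insertBy skips a prefix none of whose elements x goes before
theorem pv_insertBy_append {α : Type} (before : α → α → Bool) (x : α) (A B : List α)
    (h : ∀ y ∈ A, before x y = false) :
    PySem.List.insertBy before x (A ++ B) = A ++ PySem.List.insertBy before x B := by
  induction A with
  | nil => rfl
  | cons a A ih =>
      have ha : before x a = false := h a (by simp)
      simp [PySem.List.insertBy, ha, ih (fun y hy => h y (by simp [hy]))]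

-- insertBy puts x in front when x goes before every element
theorem pv_insertBy_front {α : Type} (before : α → α → Bool) (x : α) (ys : List α)
    (h : ∀ y ∈ ys, before x y = true) :
    PySem.List.insertBy before x ys = x :: ys := by
  cases ys with
  | nil => rfl
  | cons y ys => simp [PySem.List.insertBy, h y (by simp)]

-- a stable reverse sort under a key with values in {0,1,2,3} is the bucket concatenation
theorem pv_sorted_buckets {α : Type} (key : α → Int)
    (hk : ∀ x : α, key x = 3 ∨ key x = 2 ∨ key x = 1 ∨ key x = 0) (vs : List α) :
    PySem.List.sorted vs key true =
      vs.filter (fun x => key x == 3) ++ vs.filter (fun x => key x == 2) ++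
      vs.filter (fun x => key x == 1) ++ vs.filter (fun x => key x == 0) := by
  rw [PySem.List.sorted_rev_eq_foldl_insertBy]
  induction vs using List.reverseRecOn with
  | nil => rfl
  | append_singleton l x ih =>
      rw [List.foldl_append, List.foldl_cons, List.foldl_nil, ih]
      have hf : ∀ (c : Int), ∀ y ∈ l.filter (fun x => key x == c), key y = c := by
        intro c y hy
        have := List.of_mem_filter hy
        simpa using this
      rcases hk x with h | h | h | h <;>
        simp only [List.filter_append, List.filter_cons, List.filter_nil, h] <;>
        norm_num
      · -- key x = 3 : x goes after the red bucket, before everything else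
        rw [pv_insertBy_append _ x (l.filter (fun x => key x == 3)) _
              (by intro y hy; simp [hf 3 y hy, h]),
            pv_insertBy_front _ x _
              (by intro y hy
                  simp only [List.mem_append] at hy
                  rcases hy with hy | hy | hy
                  · simp [hf 2 y hy, h]
                  · simp [hf 1 y hy, h]
                  · simp [hf 0 y hy, h])]
      · -- key x = 2
        rw [pv_insertBy_append _ x (l.filter (fun x => key x == 3)) _
              (by intro y hy; simp [hf 3 y hy, h]),
            pv_insertBy_append _ x (l.filter (fun x => key x == 2)) _
              (by intro y hy; simp [hf 2 y hy, h]),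
            pv_insertBy_front _ x _
              (by intro y hy
                  simp only [List.mem_append] at hy
                  rcases hy with hy | hy
                  · simp [hf 1 y hy, h]
                  · simp [hf 0 y hy, h])]
      · -- key x = 1
        rw [pv_insertBy_append _ x (l.filter (fun x => key x == 3)) _
              (by intro y hy; simp [hf 3 y hy, h]),
            pv_insertBy_append _ x (l.filter (fun x => key x == 2)) _
              (by intro y hy; simp [hf 2 y hy, h]),
            pv_insertBy_append _ x (l.filter (fun x => key x == 1)) _
              (by intro y hy; simp [hf 1 y hy, h]),
            pv_insertBy_front _ x _ (by intro y hy; simp [hf 0 y hy, h])]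
      · -- key x = 0 : x goes to the very end
        rw [PySem.List.insertBy_of_forall_not_before _ x _
              (by intro y hy
                  simp only [List.mem_append] at hy
                  rcases hy with hy | hy | hy | hy
                  · simp [hf 3 y hy, h]
                  · simp [hf 2 y hy, h]
                  · simp [hf 1 y hy, h]
                  · simp [hf 0 y hy, h])]
        simp

-- the bucket loop for an abstract step function that appends each element to its severity bucket
theorem pv_bucket_fold_gen {α : Type} (key : α → Int)
    (f : List α × List α × List α × List α → α → List α × List α × List α × List α)
    (hf3 : ∀ r a y o x, key x = 3 → f (r, a, y, o) x = (r ++ [x], a, y, o))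
    (hf2 : ∀ r a y o x, key x = 2 → f (r, a, y, o) x = (r, a ++ [x], y, o))
    (hf1 : ∀ r a y o x, key x = 1 → f (r, a, y, o) x = (r, a, y ++ [x], o))
    (hf0 : ∀ r a y o x, key x = 0 → f (r, a, y, o) x = (r, a, y, o ++ [x]))
    (hk : ∀ x : α, key x = 3 ∨ key x = 2 ∨ key x = 1 ∨ key x = 0) :
    ∀ (vs : List α) (r a y o : List α),
      vs.foldl f (r, a, y, o) =
        (r ++ vs.filter (fun x => key x == 3), a ++ vs.filter (fun x => key x == 2),
         y ++ vs.filter (fun x => key x == 1), o ++ vs.filter (fun x => key x == 0)) := by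
  intro vs
  induction vs with
  | nil => intro r a y o; simp
  | cons v vs ih =>
      intro r a y o
      rcases hk v with h | h | h | h
      · rw [List.foldl_cons, hf3 r a y o v h, ih]; simp [h]
      · rw [List.foldl_cons, hf2 r a y o v h, ih]; simp [h]
      · rw [List.foldl_cons, hf1 r a y o v h, ih]; simp [h]
      · rw [List.foldl_cons, hf0 r a y o v h, ih]; simp [h]

-- ===== VERDICT (by name: the statement is the Claim_ definition above) =====
theorem consolidate_risks_spec : Claim_equal_consolidate_risks := by
  intro all_risks _ _
  unfold Spec_consolidate_risks consolidate_risks consolidate_risks_alt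
  dsimp only
  -- the two dedup folds agree pointwise
  have hmap :
      all_risks.foldl (fun m risk =>
        let risk_key := PySem.Dict.getD (PySem.Dict.mk risk) "description" "Unknown risk"
        match m.get? risk_key with
        | some existing =>
            let existing_level := PySem.Dict.getD (PySem.Dict.mk existing) "level" ""
            let new_level := PySem.Dict.getD (PySem.Dict.mk risk) "level" ""
            let so := PySem.Dict.mk [("yellow", (1 : Int)), ("amber", 2), ("red", 3)]
            if so.getD new_level 0 > so.getD existing_level 0 then m.insert risk_key risk else m
        | none => m.insert risk_key risk) PySem.Dict.empty =
      all_risks.foldl (fun m risk =>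
        let key := PySem.Dict.getD (PySem.Dict.mk risk) "description" "Unknown risk"
        match m.get? key with
        | none => m.insert key risk
        | some cur =>
            if pvSevB (PySem.Dict.getD (PySem.Dict.mk risk) "level" "") >
               pvSevB (PySem.Dict.getD (PySem.Dict.mk cur) "level" "")
            then m.insert key risk else m) PySem.Dict.empty := by
    apply PySem.List.foldl_congr_mem
    intro m risk _
    cases hg : m.get? (PySem.Dict.getD (PySem.Dict.mk risk) "description" "Unknown risk") <;>
      simp [hg, pvSevB]
  rw [hmap]
  -- the bucket loop of B is the four severity filters
  rw [pv_bucket_fold_gen (fun x => pvKey x) _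
        (by intro r a y o x h
            have hlv : PySem.Dict.getD (PySem.Dict.mk x) "level" "" = "red" := by
              have : ((PySem.Dict.getD (PySem.Dict.mk x) "level" "") == "red") = true := by
                rw [pvSevB_red]; simpa using h
              simpa using this
            simp [hlv])
        (by intro r a y o x h
            have hlv : PySem.Dict.getD (PySem.Dict.mk x) "level" "" = "amber" := by
              have : ((PySem.Dict.getD (PySem.Dict.mk x) "level" "") == "amber") = true := by
                rw [pvSevB_amber]; simpa using h
              simpa using this
            simp [hlv])
        (by intro r a y o x h
            have hlv : PySem.Dict.getD (PySem.Dict.mk x) "level" "" = "yellow" := by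
              have : ((PySem.Dict.getD (PySem.Dict.mk x) "level" "") == "yellow") = true := by
                rw [pvSevB_yellow]; simpa using h
              simpa using this
            simp [hlv])
        (by intro r a y o x h
            have h' : pvSevB (PySem.Dict.getD (PySem.Dict.mk x) "level" "") = 0 := h
            have b3 : ((PySem.Dict.getD (PySem.Dict.mk x) "level" "") == "red") = false := by
              rw [pvSevB_red]; simp [h']
            have b2 : ((PySem.Dict.getD (PySem.Dict.mk x) "level" "") == "amber") = false := by
              rw [pvSevB_amber]; simp [h']
            have b1 : ((PySem.Dict.getD (PySem.Dict.mk x) "level" "") == "yellow") = false := by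
              rw [pvSevB_yellow]; simp [h']
            simp [b3, b2, b1])
        (fun x => pvSevB_cases (pvLvl x))]
  -- A's sort key is pvKey, and the reverse sort is the bucket concatenation
  have hkeys :
      (fun x => (PySem.Dict.mk [("red", (3 : Int)), ("amber", 2), ("yellow", 1)]).getD
          (PySem.Dict.getD (PySem.Dict.mk x) "level" "") 0) =
      (fun x : List (String × String) => pvKey x) := by
    funext x; rw [pvSevA_eq]; rfl
  rw [hkeys, pv_sorted_buckets (fun x => pvKey x) (fun x => pvSevB_cases (pvLvl x))]
  simp
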